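-- pv_equiv track=rewrite | github.com/librefang/librefang-ios | scripts/check_string_catalog.py | collapse_raw_interpolations
-- ===== SOURCE A (Python) =====
-- def collapse_raw_interpolations(value: str) -> str:
--     buffer: list[str] = []
--     i = 0
--
--     while i < len(value):
--         ch = value[i]
--
--         if ch == "\\" and i + 1 < len(value):
--             nxt = value[i + 1]
--
--             if nxt == "(":
--                 buffer.append("<?>")
--                 i += 2
--                 depth = 1
--
--                 while i < len(value) and depth > 0:
--                     inner = value[i]
--
--                     if inner == '"':
--                         i += 1
--                         while i < len(value):
--                             if value[i] == "\\" and i + 1 < len(value):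
--                                 i += 2
--                                 continue
--                             if value[i] == '"':
--                                 i += 1
--                                 break
--                             i += 1
--                         continue
--
--                     if inner == "(":
--                         depth += 1
--                     elif inner == ")":
--                         depth -= 1
--                     i += 1
--
--                 continue
--
--             if nxt == '"':
--                 buffer.append('"')
--                 i += 2
--                 continue
--
--         buffer.append(ch)
--         i += 1
--
--     return "".join(buffer)
-- ===== SOURCE B (Python) =====
-- def collapse_raw_interpolations(value: str) -> str:
--     # Single-pass finite-state automaton over the characters: modes
--     # 'top' (copying), 'bs' (pending backslash at top level),
--     # 'interp' (inside \(...), depth counted), 'str' (string literal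
--     # inside the interpolation), 'strbs' (escape inside that string).
--     out = []
--     mode = 'top'
--     depth = 0
--     for c in value:
--         if mode == 'top':
--             if c == '\\':
--                 mode = 'bs'
--             else:
--                 out.append(c)
--         elif mode == 'bs':
--             if c == '(':
--                 out.append('<?>')
--                 mode = 'interp'
--                 depth = 1
--             elif c == '"':
--                 out.append('"')
--                 mode = 'top'
--             elif c == '\\':
--                 out.append('\\')  # emit pending backslash, keep new one pending
--             else:
--                 out.append('\\')
--                 out.append(c)
--                 mode = 'top'
--         elif mode == 'interp':
--             if c == '"':
--                 mode = 'str'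
--             elif c == '(':
--                 depth += 1
--             elif c == ')':
--                 depth -= 1
--                 if depth == 0:
--                     mode = 'top'
--         elif mode == 'str':
--             if c == '\\':
--                 mode = 'strbs'
--             elif c == '"':
--                 mode = 'interp'
--         else:  # 'strbs'
--             mode = 'str'
--     if mode == 'bs':
--         out.append('\\')
--     return ''.join(out)
-- ===== Notes on version B (the rewrite author's own statement) =====
-- stated objective: alternative
-- what changed: A's index-jumping nested while-loops (inline depth counter and inlined string-skipping loop with lookahead and i+=2 jumps) are replaced by a single for-each-character finite-state automaton with explicit modes (top, pending-backslash, interpolation-with-depth, string, string-escape) and no index arithmetic.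
import Mathlib
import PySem

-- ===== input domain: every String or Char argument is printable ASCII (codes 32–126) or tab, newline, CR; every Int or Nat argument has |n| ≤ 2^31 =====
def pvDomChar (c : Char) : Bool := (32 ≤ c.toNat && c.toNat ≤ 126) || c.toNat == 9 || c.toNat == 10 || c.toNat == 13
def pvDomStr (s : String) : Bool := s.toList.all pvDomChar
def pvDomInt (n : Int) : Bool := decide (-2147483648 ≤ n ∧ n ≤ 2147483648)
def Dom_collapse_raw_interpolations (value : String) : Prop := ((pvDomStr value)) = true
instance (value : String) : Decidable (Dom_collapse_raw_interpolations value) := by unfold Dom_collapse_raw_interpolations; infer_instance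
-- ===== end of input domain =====

-- B replaces A's index-jumping nested loops by a single character-at-a-time
-- finite-state automaton (modes: top / pending-backslash / interpolation with
-- depth / string / string-escape); objective: alternative decomposition, same cost.
-- A-port loops carry a `fuel` parameter (a plain totality guard: each iteration
-- advances i by at least 1, so fuel `s.length` never runs out before the exit).

-- ===== PORT A =====
-- A's innermost while loop (skip over a string literal inside the
-- interpolation); returns the new value of i.
def aStrSkip (s : List Char) (fuel i : Nat) : Nat :=
  match fuel with
  | 0 => i
  | f + 1 =>
    if _h : i < s.length then
      if s[i] = '\\' ∧ i + 1 < s.length then aStrSkip s f (i + 2)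
      else if s[i] = '"' then i + 1
      else aStrSkip s f (i + 1)
    else i

-- A's `while i < len(value) and depth > 0` loop; returns the new value of i.
def aDepth (s : List Char) (fuel i depth : Nat) : Nat :=
  match fuel with
  | 0 => i
  | f + 1 =>
    if h : i < s.length ∧ 0 < depth then
      if s[i]'h.1 = '"' then aDepth s f (aStrSkip s s.length (i + 1)) depth
      else if s[i]'h.1 = '(' then aDepth s f (i + 1) (depth + 1)
      else if s[i]'h.1 = ')' then aDepth s f (i + 1) (depth - 1)
      else aDepth s f (i + 1) depth
    else i

-- A's outer while loop, accumulating the buffer.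
def aMain (s : List Char) (fuel i : Nat) : List Char :=
  match fuel with
  | 0 => []
  | f + 1 =>
    if _h : i < s.length then
      if h2 : s[i] = '\\' ∧ i + 1 < s.length then
        if s[i + 1]'h2.2 = '(' then '<' :: '?' :: '>' :: aMain s f (aDepth s s.length (i + 2) 1)
        else if s[i + 1]'h2.2 = '"' then '"' :: aMain s f (i + 2)
        else s[i] :: aMain s f (i + 1)
      else s[i] :: aMain s f (i + 1)
    else []

def collapse_raw_interpolations (value : String) : String :=
  String.ofList (aMain value.toList value.toList.length 0)

-- ===== PORT B =====
-- B's automaton state (Source B's `mode` string together with `depth`).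
inductive BMode : Type
  | top : BMode
  | bs : BMode
  | interp : Nat → BMode
  | instr : Nat → BMode
  | instrbs : Nat → BMode
deriving DecidableEq, Repr

-- Source B's `for c in value` loop as structural recursion on the character list;
-- the end-of-input flush of a pending top-level backslash is the `.bs, []` case.
def bRun : BMode → List Char → List Char
  | .bs, [] => ['\\']
  | _, [] => []
  | .top, c :: rest => if c = '\\' then bRun .bs rest else c :: bRun .top rest
  | .bs, c :: rest =>
      if c = '(' then '<' :: '?' :: '>' :: bRun (.interp 1) rest
      else if c = '"' then '"' :: bRun .top rest
      else if c = '\\' then '\\' :: bRun .bs rest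
      else '\\' :: c :: bRun .top rest
  | .interp d, c :: rest =>
      if c = '"' then bRun (.instr d) rest
      else if c = '(' then bRun (.interp (d + 1)) rest
      else if c = ')' then (if d = 1 then bRun .top rest else bRun (.interp (d - 1)) rest)
      else bRun (.interp d) rest
  | .instr d, c :: rest =>
      if c = '\\' then bRun (.instrbs d) rest
      else if c = '"' then bRun (.interp d) rest
      else bRun (.instr d) rest
  | .instrbs d, _ :: rest => bRun (.instr d) rest

def collapse_raw_interpolations_alt (value : String) : String :=
  String.ofList (bRun .top value.toList)

-- ===== PRECONDITION & SPEC =====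
def Spec_collapse_raw_interpolations (value : String) (out : String) : Prop := out = collapse_raw_interpolations_alt value
instance (value : String) (out : String) : Decidable (Spec_collapse_raw_interpolations value out) := by unfold Spec_collapse_raw_interpolations; infer_instance

-- ===== CLAIM (what is proved, stated in full; the proofs are below) =====
def Claim_equal_collapse_raw_interpolations : Prop := ∀ (value : String), Dom_collapse_raw_interpolations value → Spec_collapse_raw_interpolations value (collapse_raw_interpolations value)

-- ===== LEMMAS AND PROOFS =====

theorem drop_cons (s : List Char) (i : Nat) (h : i < s.length) :
    s.drop i = s[i] :: s.drop (i + 1) := by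
  exact List.drop_eq_getElem_cons h

theorem aStrSkip_ge (s : List Char) : ∀ f i, i ≤ aStrSkip s f i := by
  intro f
  induction f with
  | zero => intro i; simp [aStrSkip]
  | succ f ih =>
    intro i
    simp only [aStrSkip]
    split_ifs with h1 h2 h3
    · have := ih (i + 2); omega
    · omega
    · have := ih (i + 1); omega
    · omega

theorem aDepth_ge (s : List Char) : ∀ f i d, i ≤ aDepth s f i d := by
  intro f
  induction f with
  | zero => intro i d; simp [aDepth]
  | succ f ih =>
    intro i d
    simp only [aDepth]
    split_ifs with h1 h2 h3 h4
    · have h5 := aStrSkip_ge s s.length (i + 1)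
      have := ih (aStrSkip s s.length (i + 1)) d; omega
    · have := ih (i + 1) (d + 1); omega
    · have := ih (i + 1) (d - 1); omega
    · have := ih (i + 1) d; omega
    · omega

theorem aDepth_zero (s : List Char) : ∀ f i, aDepth s f i 0 = i := by
  intro f i
  cases f <;> simp [aDepth]

-- A's string-skipping loop corresponds to B's `instr`/`instrbs` modes.
theorem strSkip_run (s : List Char) :
    ∀ f i d, s.length - i ≤ f →
      bRun (.instr d) (s.drop i) = bRun (.interp d) (s.drop (aStrSkip s f i)) := by
  intro f
  induction f with
  | zero =>
    intro i d h
    have hi : s.length ≤ i := by omega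
    rw [List.drop_eq_nil_of_le hi, aStrSkip, List.drop_eq_nil_of_le hi]
    rfl
  | succ f ih =>
    intro i d h
    by_cases hi : i < s.length
    · rw [drop_cons s i hi]
      simp only [aStrSkip, dif_pos hi]
      by_cases h1 : s[i] = '\\' ∧ i + 1 < s.length
      · rw [if_pos h1, bRun, if_pos h1.1, drop_cons s (i + 1) h1.2, bRun]
        exact ih (i + 2) d (by omega)
      · rw [if_neg h1]
        by_cases hq : s[i] = '"'
        · rw [if_pos hq, bRun, if_neg (by simp [hq]), if_pos hq]
        · rw [if_neg hq, bRun]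
          by_cases hb : s[i] = '\\'
          · -- trailing backslash: i+1 ≥ len, both sides end with empty input
            have hl : s.length ≤ i + 1 := by
              by_contra hc; exact h1 ⟨hb, by omega⟩
            rw [if_pos hb, List.drop_eq_nil_of_le hl,
              List.drop_eq_nil_of_le (le_trans hl (aStrSkip_ge s f (i + 1)))]
            rfl
          · rw [if_neg hb, if_neg hq]
            exact ih (i + 1) d (by omega)
    · have hl : s.length ≤ i := by omega
      rw [List.drop_eq_nil_of_le hl, aStrSkip, dif_neg hi, List.drop_eq_nil_of_le hl]
      rfl

-- A's depth-counter loop corresponds to B's `interp d` mode (d ≥ 1).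
theorem depth_run (s : List Char) :
    ∀ f i d, s.length - i ≤ f → 1 ≤ d →
      bRun (.interp d) (s.drop i) = bRun .top (s.drop (aDepth s f i d)) := by
  intro f
  induction f with
  | zero =>
    intro i d h hd
    have hi : s.length ≤ i := by omega
    rw [List.drop_eq_nil_of_le hi, aDepth, List.drop_eq_nil_of_le hi]
    rfl
  | succ f ih =>
    intro i d h hd
    by_cases hi : i < s.length
    · rw [drop_cons s i hi]
      simp only [aDepth, dif_pos (⟨hi, by omega⟩ : i < s.length ∧ 0 < d)]
      by_cases hq : s[i] = '"'
      · rw [if_pos hq, bRun, if_pos hq]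
        rw [strSkip_run s s.length (i + 1) d (by omega)]
        have := aStrSkip_ge s s.length (i + 1)
        exact ih (aStrSkip s s.length (i + 1)) d (by omega) hd
      · rw [if_neg hq, bRun, if_neg hq]
        by_cases hp : s[i] = '('
        · rw [if_pos hp, if_pos hp]
          exact ih (i + 1) (d + 1) (by omega) (by omega)
        · rw [if_neg hp, if_neg hp]
          by_cases hc : s[i] = ')'
          · rw [if_pos hc, if_pos hc]
            by_cases h1 : d = 1
            · rw [if_pos h1, h1]
              simp only [Nat.sub_self]
              rw [aDepth_zero]
            · rw [if_neg h1]
              exact ih (i + 1) (d - 1) (by omega) (by omega)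
          · rw [if_neg hc, if_neg hc]
            exact ih (i + 1) d (by omega) hd
    · have hl : s.length ≤ i := by omega
      rw [List.drop_eq_nil_of_le hl, aDepth, dif_neg (by omega), List.drop_eq_nil_of_le hl]
      rfl

-- A's outer loop corresponds to B's `top`/`bs` modes.
theorem main_run (s : List Char) :
    ∀ f i, s.length - i ≤ f → aMain s f i = bRun .top (s.drop i) := by
  intro f
  induction f with
  | zero =>
    intro i h
    rw [aMain, List.drop_eq_nil_of_le (by omega)]
    rfl
  | succ f ih =>
    intro i h
    by_cases hi : i < s.length
    · rw [drop_cons s i hi]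
      simp only [aMain, dif_pos hi]
      by_cases hb : s[i] = '\\'
      · rw [bRun, if_pos hb]
        by_cases hn : i + 1 < s.length
        · have h2 : s[i] = '\\' ∧ i + 1 < s.length := ⟨hb, hn⟩
          rw [dif_pos h2, drop_cons s (i + 1) hn]
          by_cases hp : s[i + 1] = '('
          · rw [if_pos hp, bRun, if_pos hp]
            have := aDepth_ge s s.length (i + 2) 1
            rw [ih (aDepth s s.length (i + 2) 1) (by omega)]
            rw [show i + 1 + 1 = i + 2 from rfl,
              ← depth_run s s.length (i + 2) 1 (by omega) (by omega)]
          · rw [if_neg hp, bRun, if_neg hp]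
            by_cases hq : s[i + 1] = '"'
            · rw [if_pos hq, if_pos hq, ih (i + 2) (by omega)]
            · rw [if_neg hq, if_neg hq]
              rw [hb, ih (i + 1) (by omega), drop_cons s (i + 1) hn]
              by_cases hb2 : s[i + 1] = '\\'
              · rw [if_pos hb2, bRun, if_pos hb2]
              · rw [if_neg hb2, bRun, if_neg hb2]
        · -- trailing backslash at top level: A emits it, B's final flush emits it
          have h2 : ¬ (s[i] = '\\' ∧ i + 1 < s.length) := by
            intro hc; exact hn hc.2
          rw [dif_neg h2, hb, List.drop_eq_nil_of_le (by omega), bRun]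
          have : aMain s f (i + 1) = [] := by
            cases f with
            | zero => rw [aMain]
            | succ g => rw [aMain, dif_neg (by omega)]
          rw [this]
      · have h2 : ¬ (s[i] = '\\' ∧ i + 1 < s.length) := by
          intro hc; exact hb hc.1
        rw [dif_neg h2, bRun, if_neg hb, ih (i + 1) (by omega)]
    · rw [aMain, dif_neg hi, List.drop_eq_nil_of_le (by omega)]
      rfl

-- ===== VERDICT (by name: the statement is the Claim_ definition above) =====
theorem collapse_raw_interpolations_spec : Claim_equal_collapse_raw_interpolations := by
  intro value _
  unfold Spec_collapse_raw_interpolations collapse_raw_interpolations collapse_raw_interpolations_alt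
  rw [main_run value.toList value.toList.length 0 (by omega), List.drop_zero]
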